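-- pv_equiv track=rewrite | github.com/monecky/AT | src/algorithm/bottom_up.py | thin_out
-- ===== SOURCE A (Python) =====
-- def thin_out(mapping_value, node):
--     # Thin out options, by choosing the smallest with the nodes.
--     option = []
--     for change in mapping_value:
--         add = True
--         for found in option:
--             if found[1] == change[1]:
--                 add = False
--                 if found[0] > change[0]:
--                     option.remove(found)
--                     option.append(change)
--         if add:
--             option += [change]
--     return option
-- ===== SOURCE B (Python) =====
-- def thin_out(mapping_value, node):
--     # The row kept for key k is the one at argmin index: the FIRST row attaining
--     # the minimal cost for k.  A's move-to-end churn makes the output order simply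
--     # ascending argmin index, so B never maintains an output list at all: one pass
--     # records each key's running (min cost, argmin index), then the input is
--     # filtered by that index set.
--     best = {}  # key -> (minimal cost so far, index of first row attaining it)
--     for i, row in enumerate(mapping_value):
--         k = row[1]
--         if k not in best or best[k][0] > row[0]:
--             best[k] = (row[0], i)
--     keep = {i for _, i in best.values()}
--     return [row for i, row in enumerate(mapping_value) if i in keep]
-- ===== Notes on version B (the rewrite author's own statement) =====
-- stated objective: alternative
-- what changed: A incrementally maintains the output list, rescanning and mutating it (remove + append, move-to-end) for every incoming row; B never builds the output incrementally at all: it observes that A's kept row per key is the first row attaining that key's minimal cost and that A's move-to-end churn makes the final order exactly ascending argmin index, so B does one pass recording per key (min cost, argmin index) and then returns the input filtered by that index set.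
-- outside the precondition, e.g. on thin_out([()], 0): A returns [()], B raises IndexError; on thin_out([(5,)], 0): A returns [(5,)], B raises IndexError
import Mathlib
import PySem

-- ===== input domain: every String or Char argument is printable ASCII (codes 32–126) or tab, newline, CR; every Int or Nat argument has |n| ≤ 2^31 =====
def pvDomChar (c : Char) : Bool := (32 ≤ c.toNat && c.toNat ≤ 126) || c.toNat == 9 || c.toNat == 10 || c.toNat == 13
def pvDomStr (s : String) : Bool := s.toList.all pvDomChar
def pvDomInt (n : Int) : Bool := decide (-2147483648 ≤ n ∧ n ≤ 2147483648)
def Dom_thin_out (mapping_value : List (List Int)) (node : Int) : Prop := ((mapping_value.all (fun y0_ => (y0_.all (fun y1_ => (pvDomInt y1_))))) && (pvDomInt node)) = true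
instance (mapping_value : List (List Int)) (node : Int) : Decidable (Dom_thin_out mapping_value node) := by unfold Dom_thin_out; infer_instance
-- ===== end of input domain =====

-- B drops A's incrementally maintained output list entirely: one pass records each
-- key's (min cost, argmin index), then the input is filtered by that index set.


-- ===== PORT A =====
-- Python's `for found in option` over a list mutated in the loop body walks an
-- internal index and re-checks it against len(option) each iteration; here the
-- length of `option` is invariant across remove+append, so the index loop is
-- rendered with fuel = the length at loop entry plus an index bound check.
def thinInner (change : List Int) : Nat → Nat → List (List Int) → Bool → (List (List Int) × Bool)
  | 0, _, option, add => (option, add)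
  | r + 1, i, option, add =>
    match option[i]? with
    | none => (option, add)
    | some found =>
      if PySem.List.pyGetD found 1 0 = PySem.List.pyGetD change 1 0 then
        if PySem.List.pyGetD found 0 0 > PySem.List.pyGetD change 0 0 then
          thinInner change r (i + 1) ((PySem.List.remove? option found).getD option ++ [change]) false
        else
          thinInner change r (i + 1) option false
      else
        thinInner change r (i + 1) option add

-- the body of A's outer `for change in mapping_value` loop
def thinStep (option : List (List Int)) (change : List Int) : List (List Int) :=
  let res := thinInner change option.length 0 option true
  if res.2 then res.1 ++ [change] else res.1

def thin_out (mapping_value : List (List Int)) (node : Int) : List (List Int) :=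
  mapping_value.foldl thinStep []

-- ===== PORT B =====
-- the body of B's `for i, row in enumerate(mapping_value)` recording loop
def bestStep (best : PySem.Dict Int (Int × Int)) (p : Int × List Int) : PySem.Dict Int (Int × Int) :=
  match best.get? (PySem.List.pyGetD p.2 1 0) with
  | none => best.insert (PySem.List.pyGetD p.2 1 0) (PySem.List.pyGetD p.2 0 0, p.1)
  | some cj =>
    if cj.1 > PySem.List.pyGetD p.2 0 0 then
      best.insert (PySem.List.pyGetD p.2 1 0) (PySem.List.pyGetD p.2 0 0, p.1)
    else best

def thin_out_alt (mapping_value : List (List Int)) (node : Int) : List (List Int) :=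
  let best := (PySem.List.enumerate mapping_value 0).foldl bestStep PySem.Dict.empty
  let keep := PySem.Set.ofList (best.values.map Prod.snd)
  ((PySem.List.enumerate mapping_value 0).filter (fun p => keep.contains p.1)).map Prod.snd

-- ===== PRECONDITION & SPEC =====
-- Pre_ excludes rows of length < 2: on them B raises IndexError at row[1],
-- and so does A except in the degenerate one-row input, whose row A never indexes.
def Pre_thin_out (mapping_value : List (List Int)) (node : Int) : Prop :=
  ∀ r ∈ mapping_value, 2 ≤ r.length
instance (mapping_value : List (List Int)) (node : Int) : Decidable (Pre_thin_out mapping_value node) := by unfold Pre_thin_out; infer_instance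

def pvWitness_thin_out : List (List Int) × Int := ([[3, 7], [1, 7], [2, 5]], 0)

def Spec_thin_out (mapping_value : List (List Int)) (node : Int) (out : List (List Int)) : Prop := out = thin_out_alt mapping_value node
instance (mapping_value : List (List Int)) (node : Int) (out : List (List Int)) : Decidable (Spec_thin_out mapping_value node out) := by unfold Spec_thin_out; infer_instance

-- ===== CLAIM (what is proved, stated in full; the proofs are below) =====
def Claim_equal_thin_out : Prop := ∀ (mapping_value : List (List Int)) (node : Int), Dom_thin_out mapping_value node → Pre_thin_out mapping_value node → Spec_thin_out mapping_value node (thin_out mapping_value node)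

-- ===== LEMMAS AND PROOFS =====

def kOf (r : List Int) : Int := PySem.List.pyGetD r 1 0
def cOf (r : List Int) : Int := PySem.List.pyGetD r 0 0

-- an enumerated row as best records it: (key, (cost, index))
def gmap (p : Int × List Int) : Int × (Int × Int) := (kOf p.2, (cOf p.2, p.1))

-- Scanning a region in which no element strictly beats `change` on its key
-- leaves the list unchanged and only clears `add` on a key match.
theorem thinInner_noop (change : List Int) :
    ∀ (r i : Nat) (opt : List (List Int)) (add : Bool),
    (∀ e ∈ (opt.drop i).take r, ¬(kOf e = kOf change ∧ cOf change < cOf e)) →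
    thinInner change r i opt add
      = (opt, add && ((opt.drop i).take r).all (fun e => kOf e != kOf change)) := by
  intro r
  induction r with
  | zero => intro i opt add h; simp [thinInner]
  | succ r ih =>
    intro i opt add h
    cases hgi : opt[i]? with
    | none =>
      have hlen : opt.length ≤ i := List.getElem?_eq_none_iff.mp hgi
      have hdrop : opt.drop i = [] := List.drop_eq_nil_iff.mpr hlen
      simp [thinInner, hgi, hdrop]
    | some found =>
      obtain ⟨hlt, hgeq⟩ := List.getElem?_eq_some_iff.mp hgi
      have hdrop : opt.drop i = found :: opt.drop (i + 1) := by
        rw [List.drop_eq_getElem_cons hlt, hgeq]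
      have hmem : found ∈ (opt.drop i).take (r + 1) := by rw [hdrop]; simp
      have htail : ∀ e ∈ (opt.drop (i + 1)).take r, ¬(kOf e = kOf change ∧ cOf change < cOf e) := by
        intro e he
        exact h e (by rw [hdrop, List.take_succ_cons]; exact List.mem_cons_of_mem _ he)
      have hfound := h found hmem
      rw [hdrop, List.take_succ_cons, List.all_cons]
      by_cases hk : kOf found = kOf change
      · have hc : ¬ (cOf change < cOf found) := fun hcc => hfound ⟨hk, hcc⟩
        have : thinInner change (r + 1) i opt add = thinInner change r (i + 1) opt false := by
          rw [thinInner, hgi]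
          simp only [kOf, cOf] at hk hc
          simp [hk, hc]
        rw [this, ih (i + 1) opt false htail]
        simp [hk]
      · have : thinInner change (r + 1) i opt add = thinInner change r (i + 1) opt add := by
          rw [thinInner, hgi]
          simp only [kOf] at hk
          simp [hk]
        rw [this, ih (i + 1) opt add htail]
        have hb : (kOf found != kOf change) = true := bne_iff_ne.mpr hk
        simp [hb]

-- Advancing past a prefix of the scan region whose keys all differ from change's.
theorem thinInner_adv (change : List Int) :
    ∀ (m r i : Nat) (opt : List (List Int)) (add : Bool),
    (∀ e ∈ (opt.drop i).take m, kOf e ≠ kOf change) →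
    thinInner change (m + r) i opt add = thinInner change r (i + m) opt add := by
  intro m
  induction m with
  | zero => intro r i opt add _; simp
  | succ m ih =>
    intro r i opt add h
    cases hgi : opt[i]? with
    | none =>
      have hlen : opt.length ≤ i := List.getElem?_eq_none_iff.mp hgi
      have h2 : opt[i + (m + 1)]? = none := List.getElem?_eq_none_iff.mpr (by omega)
      have e1 : m + 1 + r = (m + r) + 1 := by omega
      rw [e1, thinInner, hgi]
      cases r with
      | zero => simp [thinInner]
      | succ r => rw [thinInner, h2]
    | some found =>
      obtain ⟨hlt, hgeq⟩ := List.getElem?_eq_some_iff.mp hgi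
      have hdrop : opt.drop i = found :: opt.drop (i + 1) := by
        rw [List.drop_eq_getElem_cons hlt, hgeq]
      have hfound : kOf found ≠ kOf change := by
        apply h found; rw [hdrop, List.take_succ_cons]; exact List.mem_cons_self
      have htail : ∀ e ∈ (opt.drop (i + 1)).take m, kOf e ≠ kOf change := by
        intro e he
        exact h e (by rw [hdrop, List.take_succ_cons]; exact List.mem_cons_of_mem _ he)
      have e1 : m + 1 + r = (m + r) + 1 := by omega
      have e2 : i + (m + 1) = (i + 1) + m := by omega
      rw [e1, thinInner, hgi]
      simp only [kOf] at hfound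
      simp only [hfound, ite_false]
      rw [ih r (i + 1) opt add htail, e2]

-- Fresh key: the inner loop is a no-op that leaves `add` set.
theorem thinInner_absent (change : List Int) (opt : List (List Int))
    (h : ∀ e ∈ opt, kOf e ≠ kOf change) :
    thinInner change opt.length 0 opt true = (opt, true) := by
  have hcond : ∀ e ∈ (opt.drop 0).take opt.length, ¬(kOf e = kOf change ∧ cOf change < cOf e) := by
    intro e he
    rw [List.drop_zero, List.take_length] at he
    exact fun hp => h e he hp.1
  rw [thinInner_noop change opt.length 0 opt true hcond]
  simp only [List.drop_zero, List.take_length, Bool.true_and]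
  congr 1
  rw [List.all_eq_true]
  exact fun e he => bne_iff_ne.mpr (h e he)

theorem thinInner_keep (change f : List Int) (pre post : List (List Int))
    (hpre : ∀ e ∈ pre, kOf e ≠ kOf change) (hpost : ∀ e ∈ post, kOf e ≠ kOf change)
    (hf : kOf f = kOf change) (hc : ¬ cOf change < cOf f) :
    thinInner change (pre ++ f :: post).length 0 (pre ++ f :: post) true
      = (pre ++ f :: post, false) := by
  have hlen : (pre ++ f :: post).length = pre.length + (1 + post.length) := by simp; omega
  have hcondpre : ∀ e ∈ (((pre ++ f :: post).drop 0).take pre.length), kOf e ≠ kOf change := by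
    simpa [List.take_left] using hpre
  rw [hlen, thinInner_adv change pre.length (1 + post.length) 0 _ true hcondpre]
  have hget : (pre ++ f :: post)[0 + pre.length]? = some f := by
    simp
  rw [Nat.add_comm 1 post.length, thinInner, hget]
  simp only [kOf, cOf] at hf hc
  simp only [hf, gt_iff_lt, hc, if_false]
  have hdrop : (pre ++ f :: post).drop (0 + pre.length + 1) = post := by
    rw [show pre ++ f :: post = (pre ++ [f]) ++ post by simp,
        show 0 + pre.length + 1 = (pre ++ [f]).length by simp]
    exact List.drop_left
  have hcond : ∀ e ∈ (((pre ++ f :: post).drop (0 + pre.length + 1)).take post.length),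
      ¬(kOf e = kOf change ∧ cOf change < cOf e) := by
    rw [hdrop]
    intro e he hp
    exact hpost e (List.mem_of_mem_take he) hp.1
  rw [thinInner_noop change post.length _ _ false hcond]
  simp

theorem thinInner_swap (change f : List Int) (pre post : List (List Int))
    (hpre : ∀ e ∈ pre, kOf e ≠ kOf change) (hpost : ∀ e ∈ post, kOf e ≠ kOf change)
    (hf : kOf f = kOf change) (hc : cOf change < cOf f) :
    thinInner change (pre ++ f :: post).length 0 (pre ++ f :: post) true
      = (pre ++ (post ++ [change]), false) := by
  have hlen : (pre ++ f :: post).length = pre.length + (1 + post.length) := by simp; omega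
  have hcondpre : ∀ e ∈ (((pre ++ f :: post).drop 0).take pre.length), kOf e ≠ kOf change := by
    simpa [List.take_left] using hpre
  rw [hlen, thinInner_adv change pre.length (1 + post.length) 0 _ true hcondpre]
  have hget : (pre ++ f :: post)[0 + pre.length]? = some f := by
    simp
  rw [Nat.add_comm 1 post.length, thinInner, hget]
  have hrem : (PySem.List.remove? (pre ++ f :: post) f).getD (pre ++ f :: post) ++ [change]
      = pre ++ (post ++ [change]) := by
    have hfpre : f ∉ pre := fun hm => hpre f hm hf
    rw [PySem.List.remove?_eq_some_erase _ f (by simp)]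
    rw [Option.getD_some, List.erase_append_right _ hfpre, List.erase_cons_head]
    simp
  simp only [kOf, cOf] at hf hc
  simp only [hf, gt_iff_lt, hc, if_true, hrem]
  have hdrop : (pre ++ (post ++ [change])).drop (0 + pre.length + 1) = (post ++ [change]).drop 1 := by
    rw [show 0 + pre.length + 1 = pre.length + 1 by omega, ← List.drop_drop,
        List.drop_left]
  have hcond : ∀ e ∈ (((pre ++ (post ++ [change])).drop (0 + pre.length + 1)).take post.length),
      ¬(kOf e = kOf change ∧ cOf change < cOf e) := by
    rw [hdrop]
    intro e he hp
    have he2 : e ∈ post ++ [change] := List.mem_of_mem_drop (List.mem_of_mem_take he)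
    rcases List.mem_append.mp he2 with h1 | h1
    · exact hpost e h1 hp.1
    · have : e = change := by simpa using h1
      subst this
      exact absurd hp.2 (lt_irrefl _)
  rw [thinInner_noop change post.length _ _ false hcond]
  simp

-- Joint induction: A's evolving list `opt` is the filter of the processed prefix
-- `done` by the index set currently recorded in B's dict `best`, and stays so.
theorem fold_agree :
    ∀ (rest done : List (Int × List Int)) (best : PySem.Dict Int (Int × Int))
      (opt : List (List Int)),
    (done ++ rest).Pairwise (fun p q => p.1 < q.1) →
    best.keys.Nodup →
    best.items.Perm ((done.filter (fun p => decide (p.1 ∈ best.values.map Prod.snd))).map gmap) →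
    opt = (done.filter (fun p => decide (p.1 ∈ best.values.map Prod.snd))).map Prod.snd →
    (rest.map Prod.snd).foldl thinStep opt
      = ((done ++ rest).filter (fun p =>
          decide (p.1 ∈ (rest.foldl bestStep best).values.map Prod.snd))).map Prod.snd := by
  intro rest
  induction rest with
  | nil =>
    intro done best opt hpw hnd hperm hopt
    simpa using hopt
  | cons q rest ih =>
    intro done best opt hpw hnd hperm hopt
    obtain ⟨i, change⟩ := q
    have hdi : ∀ p ∈ done, p.1 < i := by
      rw [List.pairwise_append] at hpw
      intro p hp
      exact hpw.2.2 p hp (i, change) List.mem_cons_self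
    -- notation
    have hkc : kOf change = PySem.List.pyGetD change 1 0 := rfl
    have hcc : cOf change = PySem.List.pyGetD change 0 0 := rfl
    -- membership in the recorded index set
    have hvalsmap : best.values.map Prod.snd = best.items.map (fun q => q.2.2) := by
      show (best.items.map Prod.snd).map Prod.snd = _
      rw [List.map_map]; rfl
    have hgmap22 : ∀ (l : List (Int × List Int)),
        (l.map gmap).map (fun q => q.2.2) = l.map Prod.fst := by
      intro l; rw [List.map_map]; rfl
    have hvals : ∀ x, x ∈ best.values.map Prod.snd ↔
        x ∈ (done.filter (fun p => decide (p.1 ∈ best.values.map Prod.snd))).map Prod.fst := by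
      intro x
      have h1 : x ∈ best.values.map Prod.snd ↔ x ∈ best.items.map (fun q => q.2.2) := by
        rw [hvalsmap]
      have h2 := (hperm.map (fun q => q.2.2)).mem_iff (a := x)
      rw [hgmap22] at h2
      exact h1.trans h2
    have hvals_lt : ∀ x ∈ best.values.map Prod.snd, x < i := by
      intro x hx
      obtain ⟨p, hp, rfl⟩ := List.mem_map.mp ((hvals x).mp hx)
      exact hdi p (List.mem_of_mem_filter hp)
    have hassoc : done ++ (i, change) :: rest = (done ++ [(i, change)]) ++ rest := by simp
    have hpw' : ((done ++ [(i, change)]) ++ rest).Pairwise (fun p q => p.1 < q.1) := by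
      rw [← hassoc]; exact hpw
    rw [List.map_cons, List.foldl_cons, List.foldl_cons, hassoc]
    cases hget : best.get? (PySem.List.pyGetD change 1 0) with
    | none =>
      have hcont : best.contains (kOf change) = false := by
        rw [PySem.Dict.contains_eq_isSome_get?, hkc, hget]; rfl
      have hkeysnot : kOf change ∉ best.keys :=
        (PySem.Dict.get?_eq_none_iff_not_mem_keys best _).mp (hkc ▸ hget)
      have hFkey : ∀ p ∈ done.filter (fun p => decide (p.1 ∈ best.values.map Prod.snd)),
          kOf p.2 ≠ kOf change := by
        intro p hp heq
        have hmem : gmap p ∈ best.items := hperm.mem_iff.mpr (List.mem_map_of_mem hp)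
        have : (gmap p).1 ∈ best.keys := List.mem_map_of_mem hmem
        exact hkeysnot (heq ▸ this)
      have hoptkey : ∀ e ∈ opt, kOf e ≠ kOf change := by
        rw [hopt]
        intro e he
        obtain ⟨p, hp, rfl⟩ := List.mem_map.mp he
        exact hFkey p hp
      have hstep : thinStep opt change = opt ++ [change] := by
        unfold thinStep
        rw [thinInner_absent change opt hoptkey]
        simp
      have hbs : bestStep best (i, change)
          = best.insert (kOf change) (cOf change, i) := by
        unfold bestStep
        rw [show PySem.List.pyGetD (i, change).2 1 0 = PySem.List.pyGetD change 1 0 from rfl, hget]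
        rfl
      have hitems' : (best.insert (kOf change) (cOf change, i)).items
          = best.items ++ [(kOf change, (cOf change, i))] :=
        PySem.Dict.items_insert_of_not_contains best _ hcont
      have hvals' : (best.insert (kOf change) (cOf change, i)).values.map Prod.snd
          = best.values.map Prod.snd ++ [i] := by
        show ((best.insert (kOf change) (cOf change, i)).items.map Prod.snd).map Prod.snd = _
        rw [hitems', List.map_append, List.map_append]
        rfl
      have hF' : (done ++ [(i, change)]).filter
            (fun p => decide (p.1 ∈ (best.insert (kOf change) (cOf change, i)).values.map Prod.snd))
          = done.filter (fun p => decide (p.1 ∈ best.values.map Prod.snd)) ++ [(i, change)] := by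
        rw [List.filter_append]
        congr 1
        · apply List.filter_congr
          intro p hp
          have hne : p.1 ≠ i := (hdi p hp).ne
          simp [hvals', hne]
        · simp [hvals']
      rw [hstep, hbs]
      have := ih (done ++ [(i, change)]) (best.insert (kOf change) (cOf change, i))
        (opt ++ [change]) hpw'
        (by
          rw [PySem.Dict.keys_insert_of_not_contains best _ hcont]
          rw [List.nodup_append]
          refine ⟨hnd, List.nodup_singleton _, ?_⟩
          intro a ha b hb
          rw [List.mem_singleton] at hb
          subst hb
          exact fun h => hkeysnot (h ▸ ha))
        (by
          rw [hitems', hF', List.map_append]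
          exact hperm.append (List.Perm.refl _))
        (by rw [hF', List.map_append, ← hopt]; rfl)
      exact this
    | some cj =>
      obtain ⟨c0, j⟩ := cj
      have hmemit : (kOf change, (c0, j)) ∈ best.items :=
        PySem.Dict.mem_items_of_get?_eq_some best (hkc ▸ hget)
      obtain ⟨p, hpF, hgp⟩ := List.mem_map.mp (hperm.mem_iff.mp hmemit)
      obtain ⟨pj, r⟩ := p
      have hrk : kOf r = kOf change := congrArg Prod.fst hgp
      have hrc : cOf r = c0 := congrArg (fun q => q.2.1) hgp
      have hrj : pj = j := congrArg (fun q => q.2.2) hgp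
      obtain ⟨F1, F2, hFsplit⟩ := List.append_of_mem hpF
      rw [hrj] at hFsplit
      -- keys of the filtered prefix are distinct
      have hndF : (((done.filter (fun p => decide (p.1 ∈ best.values.map Prod.snd))).map gmap).map Prod.fst).Nodup :=
        (hperm.map Prod.fst).nodup_iff.mp hnd
      have hkeyeq : ∀ (l : List (Int × List Int)),
          (l.map gmap).map Prod.fst = l.map (fun p => kOf p.2) := by
        intro l; rw [List.map_map]; rfl
      rw [hkeyeq, hFsplit, List.map_append, List.map_cons] at hndF
      have hndF' := hndF
      rw [List.nodup_middle, List.nodup_cons, List.mem_append] at hndF'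
      have hF1key : ∀ e ∈ F1, kOf e.2 ≠ kOf change := by
        intro e he heq
        exact hndF'.1 (Or.inl (hrk ▸ heq ▸ List.mem_map_of_mem he))
      have hF2key : ∀ e ∈ F2, kOf e.2 ≠ kOf change := by
        intro e he heq
        exact hndF'.1 (Or.inr (hrk ▸ heq ▸ List.mem_map_of_mem he))
      -- indices of the filtered prefix are distinct
      have hndI : ((done.filter (fun p => decide (p.1 ∈ best.values.map Prod.snd))).map Prod.fst).Nodup := by
        have h1 : (done.map Prod.fst).Pairwise (· < ·) := by
          rw [List.pairwise_map]
          exact (List.pairwise_append.mp hpw).1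
        have h2 : ((done.filter (fun p => decide (p.1 ∈ best.values.map Prod.snd))).map Prod.fst).Sublist
            (done.map Prod.fst) := List.Sublist.map Prod.fst List.filter_sublist
        exact (h1.sublist h2).imp ne_of_lt
      rw [hFsplit, List.map_append, List.map_cons] at hndI
      have hndI' := hndI
      rw [List.nodup_middle, List.nodup_cons, List.mem_append] at hndI'
      have hjF1 : j ∉ F1.map Prod.fst := fun h => hndI'.1 (Or.inl h)
      have hjF2 : j ∉ F2.map Prod.fst := fun h => hndI'.1 (Or.inr h)
      have hji : j < i := hvals_lt j (by
        rw [hvals, hFsplit, List.map_append, List.map_cons]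
        exact List.mem_append.mpr (Or.inr List.mem_cons_self))
      -- opt splits around r
      have hoptsplit : opt = F1.map Prod.snd ++ r :: F2.map Prod.snd := by
        rw [hopt, hFsplit, List.map_append, List.map_cons]
      have hpre : ∀ e ∈ F1.map Prod.snd, kOf e ≠ kOf change := by
        intro e he
        obtain ⟨p', hp', rfl⟩ := List.mem_map.mp he
        exact hF1key p' hp'
      have hpost : ∀ e ∈ F2.map Prod.snd, kOf e ≠ kOf change := by
        intro e he
        obtain ⟨p', hp', rfl⟩ := List.mem_map.mp he
        exact hF2key p' hp'
      by_cases hc : c0 > PySem.List.pyGetD change 0 0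
      · -- strictly cheaper: A removes r and appends change; B overwrites the record
        have hstep : thinStep opt change
            = F1.map Prod.snd ++ (F2.map Prod.snd ++ [change]) := by
          unfold thinStep
          rw [hoptsplit, thinInner_swap change r (F1.map Prod.snd) (F2.map Prod.snd)
            hpre hpost hrk (by rw [hrc]; exact hc)]
          simp
        have hbs : bestStep best (i, change)
            = best.insert (kOf change) (cOf change, i) := by
          unfold bestStep
          rw [show PySem.List.pyGetD (i, change).2 1 0 = PySem.List.pyGetD change 1 0 from rfl, hget]
          simp [hc, kOf, cOf]
        have hcont : best.contains (kOf change) = true := by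
          rw [PySem.Dict.contains_eq_isSome_get?, hkc, hget]; rfl
        have hitems' : (best.insert (kOf change) (cOf change, i)).items
            = best.items.map (fun p => if p.1 == kOf change then (kOf change, (cOf change, i)) else p) :=
          PySem.Dict.items_insert_of_contains best _ hcont
        -- image of the filtered prefix under the overwrite
        have hf1 : ∀ (l : List (Int × List Int)), (∀ e ∈ l, kOf e.2 ≠ kOf change) →
            (l.map gmap).map (fun p => if p.1 == kOf change then (kOf change, (cOf change, i)) else p)
              = l.map gmap := by
          intro l hl
          rw [List.map_map]
          apply List.map_congr_left
          intro a ha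
          have h := hl a ha
          simp [gmap, Function.comp, h]
        have hmapf : ((done.filter (fun p => decide (p.1 ∈ best.values.map Prod.snd))).map gmap).map
              (fun p => if p.1 == kOf change then (kOf change, (cOf change, i)) else p)
            = F1.map gmap ++ (kOf change, (cOf change, i)) :: F2.map gmap := by
          rw [hFsplit]
          simp only [List.map_append, List.map_cons]
          congr 1
          · exact hf1 F1 hF1key
          · congr 1
            · simp [gmap, hrk]
            · exact hf1 F2 hF2key
        have hperm' : (best.insert (kOf change) (cOf change, i)).items.Perm
            (F1.map gmap ++ (kOf change, (cOf change, i)) :: F2.map gmap) := by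
          rw [hitems', ← hmapf]
          exact hperm.map _
        have hvals'mem : ∀ x, x ∈ (best.insert (kOf change) (cOf change, i)).values.map Prod.snd ↔
            x ∈ F1.map Prod.fst ++ i :: F2.map Prod.fst := by
          intro x
          have h1 : (best.insert (kOf change) (cOf change, i)).values.map Prod.snd
              = (best.insert (kOf change) (cOf change, i)).items.map (fun q => q.2.2) := by
            show ((best.insert (kOf change) (cOf change, i)).items.map Prod.snd).map Prod.snd = _
            rw [List.map_map]; rfl
          rw [h1, (hperm'.map (fun q => q.2.2)).mem_iff]
          rw [List.map_append, List.map_cons, hgmap22, hgmap22]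
        -- the new filtered prefix
        have hF' : (done ++ [(i, change)]).filter
              (fun p => decide (p.1 ∈ (best.insert (kOf change) (cOf change, i)).values.map Prod.snd))
            = (F1 ++ F2) ++ [(i, change)] := by
          rw [List.filter_append]
          congr 1
          · -- done.filter new = F1 ++ F2
            have hsub : ∀ p ∈ done,
                (decide (p.1 ∈ (best.insert (kOf change) (cOf change, i)).values.map Prod.snd) : Bool)
                = (decide (p.1 ∈ (best.insert (kOf change) (cOf change, i)).values.map Prod.snd) &&
                   decide (p.1 ∈ best.values.map Prod.snd)) := by
              intro p hp
              by_cases hmem : p.1 ∈ (best.insert (kOf change) (cOf change, i)).values.map Prod.snd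
              · have : p.1 ∈ best.values.map Prod.snd := by
                  have := (hvals'mem p.1).mp hmem
                  rw [List.mem_append, List.mem_cons] at this
                  rcases this with h | h
                  · rw [hvals, hFsplit, List.map_append]
                    exact List.mem_append.mpr (Or.inl h)
                  rcases h with h | h
                  · exact absurd h (hdi p hp).ne
                  · rw [hvals, hFsplit, List.map_append, List.map_cons]
                    exact List.mem_append.mpr (Or.inr (List.mem_cons_of_mem _ h))
                simp [hmem, this]
              · simp [hmem]
            rw [List.filter_congr hsub, ← List.filter_filter]
            rw [show done.filter (fun p => decide (p.1 ∈ best.values.map Prod.snd)) = F1 ++ (j, r) :: F2 from hFsplit]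
            rw [List.filter_append, List.filter_cons]
            have hjfail : (decide (((j, r) : Int × List Int).1 ∈
                (best.insert (kOf change) (cOf change, i)).values.map Prod.snd) : Bool) = false := by
              simp only [decide_eq_false_iff_not]
              intro hmem
              have := (hvals'mem j).mp hmem
              rw [List.mem_append, List.mem_cons] at this
              rcases this with h | h | h
              · exact hjF1 h
              · exact absurd h hji.ne
              · exact hjF2 h
            rw [hjfail]
            simp only [Bool.false_eq_true, if_false]
            congr 1
            · apply List.filter_eq_self.mpr
              intro p' hp'
              simp only [decide_eq_true_eq]
              exact (hvals'mem p'.1).mpr (List.mem_append.mpr (Or.inl (List.mem_map_of_mem hp')))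
            · apply List.filter_eq_self.mpr
              intro p' hp'
              simp only [decide_eq_true_eq]
              exact (hvals'mem p'.1).mpr
                (List.mem_append.mpr (Or.inr (List.mem_cons_of_mem _ (List.mem_map_of_mem hp'))))
          · simp only [List.filter_cons, List.filter_nil]
            have : (decide ((i : Int) ∈ (best.insert (kOf change) (cOf change, i)).values.map Prod.snd) : Bool) = true := by
              simp only [decide_eq_true_eq]
              exact (hvals'mem i).mpr (List.mem_append.mpr (Or.inr List.mem_cons_self))
            rw [this]
            simp
        rw [hstep, hbs]
        have := ih (done ++ [(i, change)]) (best.insert (kOf change) (cOf change, i))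
          (F1.map Prod.snd ++ (F2.map Prod.snd ++ [change])) hpw'
          (by
            have hkeys' : (best.insert (kOf change) (cOf change, i)).keys = best.keys := by
              show (best.insert (kOf change) (cOf change, i)).items.map Prod.fst = best.items.map Prod.fst
              rw [hitems', List.map_map]
              apply List.map_congr_left
              intro a _
              by_cases h : a.1 = kOf change
              · simp [h]
              · simp [h]
            rw [hkeys']; exact hnd)
          (by
            rw [hF', List.map_append, List.map_append]
            refine hperm'.trans ?_
            have h1 : (F1.map gmap ++ (kOf change, (cOf change, i)) :: F2.map gmap).Perm
                ((kOf change, (cOf change, i)) :: (F1.map gmap ++ F2.map gmap)) := List.perm_middle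
            refine h1.trans ?_
            have h2 : ((F1.map gmap ++ F2.map gmap) ++ [(kOf change, (cOf change, i))]).Perm
                ((kOf change, (cOf change, i)) :: (F1.map gmap ++ F2.map gmap)) :=
              List.perm_append_singleton _ _
            exact h2.symm)
          (by rw [hF', List.map_append, List.map_append]; simp)
        exact this
      · -- not cheaper: both sides keep their state
        have hstep : thinStep opt change = opt := by
          unfold thinStep
          rw [hoptsplit, thinInner_keep change r (F1.map Prod.snd) (F2.map Prod.snd)
            hpre hpost hrk (by rw [hrc]; exact hc)]
          simp [← hoptsplit]
        have hbs : bestStep best (i, change) = best := by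
          unfold bestStep
          rw [show PySem.List.pyGetD (i, change).2 1 0 = PySem.List.pyGetD change 1 0 from rfl, hget]
          simp [hc]
        have hF' : (done ++ [(i, change)]).filter
              (fun p => decide (p.1 ∈ best.values.map Prod.snd))
            = done.filter (fun p => decide (p.1 ∈ best.values.map Prod.snd)) := by
          rw [List.filter_append]
          have : (decide ((i : Int) ∈ best.values.map Prod.snd) : Bool) = false := by
            simp only [decide_eq_false_iff_not]
            intro hmem
            exact absurd (hvals_lt i hmem) (lt_irrefl i)
          simp [this]
        rw [hstep, hbs]
        have := ih (done ++ [(i, change)]) best opt hpw' hnd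
          (by rw [hF']; exact hperm)
          (by rw [hF']; exact hopt)
        exact this

-- ===== VERDICT (by name: the statement is the Claim_ definition above) =====
theorem thin_out_spec : Claim_equal_thin_out := by
  intro mv node _ _
  unfold Spec_thin_out thin_out thin_out_alt
  have h := fold_agree (PySem.List.enumerate mv 0) [] PySem.Dict.empty []
    (by simpa using PySem.List.pairwise_lt_enumerate (xs := mv) (s := 0))
    PySem.Dict.nodup_keys_empty (by simp [PySem.Dict.empty]) rfl
  rw [PySem.List.map_snd_enumerate] at h
  rw [h]
  simp only [List.nil_append]
  apply congrArg
  apply List.filter_congr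
  intro p _
  simp [PySem.Set.contains, List.contains_eq_mem, PySem.Set.mem_ofList]
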